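-- pv_equiv track=rewrite | github.com/TRBaldim/Spark | DataPrev/ProjDataPrev.py | filterDivorceDates
-- ===== SOURCE A (Python) =====
-- def filterDivorceDates(x):
-- 	dateBase = '2999-01-01'
-- 	result = ''
-- 	for i in x[1][1]:
-- 		if i == '' and result == '':
-- 			result = 'NC'
-- 		else:
-- 			if i < dateBase and i != '' and i != 'NC':
-- 				result = i
-- 				dateBase = result
-- 	return (x[0], result)
-- ===== SOURCE B (Python) =====
-- def filterDivorceDates(x):
--     dates = x[1][1]
--     valid = [i for i in dates if i < '2999-01-01' and i != '' and i != 'NC']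
--     if valid:
--         result = min(valid)
--     else:
--         result = 'NC' if '' in dates else ''
--     return (x[0], result)
-- ===== Notes on version B (the rewrite author's own statement) =====
-- stated objective: simpler
-- what changed: Replaces the single interleaved running-min/NC-state loop with a filter of valid dates followed by min(), and a separate '' membership test for the NC fallback.
import Mathlib
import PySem

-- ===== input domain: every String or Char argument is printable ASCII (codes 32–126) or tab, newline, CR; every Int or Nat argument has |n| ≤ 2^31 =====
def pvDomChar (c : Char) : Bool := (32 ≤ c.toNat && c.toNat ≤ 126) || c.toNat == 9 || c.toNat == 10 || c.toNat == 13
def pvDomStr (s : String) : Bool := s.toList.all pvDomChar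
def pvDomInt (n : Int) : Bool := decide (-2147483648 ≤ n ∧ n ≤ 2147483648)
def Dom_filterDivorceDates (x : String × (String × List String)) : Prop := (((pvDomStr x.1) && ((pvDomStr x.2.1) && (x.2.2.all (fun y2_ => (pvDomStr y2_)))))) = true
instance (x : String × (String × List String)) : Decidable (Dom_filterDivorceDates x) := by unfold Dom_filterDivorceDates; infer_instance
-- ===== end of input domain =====

-- B replaces A's single interleaved running-min/NC-state loop by: filter valid dates, take min(),
-- with a separate '' membership test for the NC fallback (objective: simpler).

-- ===== PORT A =====
-- the loop body of A, step for step (state = (dateBase, result))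
def stepA (s : String × String) (i : String) : String × String :=
  if i = "" ∧ s.2 = "" then (s.1, "NC")
  else if i < s.1 ∧ i ≠ "" ∧ i ≠ "NC" then (i, i)
  else s

def filterDivorceDates (x : String × (String × List String)) : String × String :=
  let s := x.2.2.foldl stepA ("2999-01-01", "")
  (x.1, s.2)

-- ===== PORT B =====
-- the comprehension's condition in Source B
def pvValid (i : String) : Bool := decide (i < "2999-01-01" ∧ i ≠ "" ∧ i ≠ "NC")

def filterDivorceDates_alt (x : String × (String × List String)) : String × String :=
  let valid := x.2.2.filter pvValid
  let result :=
    if valid.isEmpty then (if "" ∈ x.2.2 then "NC" else "")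
    else (PySem.List.min? valid (fun y => y)).getD ""
  (x.1, result)

-- ===== PRECONDITION & SPEC =====
def Spec_filterDivorceDates (x : String × (String × List String)) (out : String × String) : Prop := out = filterDivorceDates_alt x
instance (x : String × (String × List String)) (out : String × String) : Decidable (Spec_filterDivorceDates x out) := by unfold Spec_filterDivorceDates; infer_instance

-- ===== CLAIM (what is proved, stated in full; the proofs are below) =====
def Claim_equal_filterDivorceDates : Prop := ∀ (x : String × (String × List String)), Dom_filterDivorceDates x → Spec_filterDivorceDates x (filterDivorceDates x)

-- ===== LEMMAS AND PROOFS =====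

-- once a valid date d is the state, A's loop is the running min over the valid elements
theorem foldl_stepA_min (l : List String) (d : String)
    (h1 : d ≠ "") (h2 : d ≠ "NC") (h3 : d < "2999-01-01") :
    l.foldl stepA (d, d) = ((l.filter pvValid).foldl min d, (l.filter pvValid).foldl min d) := by
  induction l generalizing d with
  | nil => simp
  | cons i l ih =>
    simp only [List.foldl_cons, List.filter_cons, stepA]
    by_cases hv : i < d ∧ i ≠ "" ∧ i ≠ "NC"
    · have hvB : pvValid i = true := by
        unfold pvValid; rw [decide_eq_true_eq]
        exact ⟨lt_trans hv.1 h3, hv.2.1, hv.2.2⟩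
      have hne : ¬ (i = "" ∧ d = "") := fun h => h1 h.2
      rw [if_neg hne, if_pos hv, if_pos hvB]
      rw [ih i hv.2.1 hv.2.2 (lt_trans hv.1 h3)]
      have : min d i = i := min_eq_right (le_of_lt hv.1)
      simp [this]
    · have hne : ¬ (i = "" ∧ d = "") := fun h => h1 h.2
      rw [if_neg hne, if_neg hv]
      by_cases hB : pvValid i = true
      · have hdi : ¬ i < d := by
          intro hlt
          unfold pvValid at hB; rw [decide_eq_true_eq] at hB
          exact hv ⟨hlt, hB.2.1, hB.2.2⟩
        rw [if_pos hB]
        rw [ih d h1 h2 h3]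
        have : min d i = d := min_eq_left (le_of_not_gt hdi)
        simp [this]
      · rw [if_neg hB]
        exact ih d h1 h2 h3

-- before any valid date, with no valid date in sight: the NC fallback
theorem foldl_stepA_empty (l : List String) (r : String)
    (hr : r = "" ∨ r = "NC") (hf : l.filter pvValid = []) :
    (l.foldl stepA ("2999-01-01", r)).2 = if r = "NC" ∨ "" ∈ l then "NC" else "" := by
  induction l generalizing r with
  | nil =>
    rcases hr with h | h <;> simp [h]
  | cons i l ih =>
    simp only [List.filter_cons] at hf
    by_cases hB : pvValid i = true
    · rw [if_pos hB] at hf; exact absurd hf (by simp)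
    · rw [if_neg hB] at hf
      simp only [List.foldl_cons, stepA]
      have hv : ¬ (i < "2999-01-01" ∧ i ≠ "" ∧ i ≠ "NC") := by
        intro h; exact hB (by unfold pvValid; rw [decide_eq_true_eq]; exact h)
      rw [if_neg hv]
      by_cases hi : i = "" ∧ r = ""
      · rw [if_pos hi]
        rw [ih "NC" (Or.inr rfl) hf]
        simp [hi.1]
      · rw [if_neg hi]
        rw [ih r hr hf]
        by_cases hie : i = ""
        · have hrNC : r = "NC" := by
            rcases hr with h | h
            · exact absurd ⟨hie, h⟩ hi
            · exact h
          simp [hrNC]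
        · simp [List.mem_cons, Ne.symm hie]
  -- (the membership condition only shifts when i = "", in which case r is already "NC")

-- before any valid date, with a valid date ahead: the result is min over the valid elements
theorem foldl_stepA_cons (l : List String) (r v : String) (t : List String)
    (hr : r = "" ∨ r = "NC") (hf : l.filter pvValid = v :: t) :
    (l.foldl stepA ("2999-01-01", r)).2 = t.foldl min v := by
  induction l generalizing r with
  | nil => simp at hf
  | cons i l ih =>
    simp only [List.filter_cons] at hf
    simp only [List.foldl_cons, stepA]
    by_cases hB : pvValid i = true
    · rw [if_pos hB] at hf
      have hv : i < "2999-01-01" ∧ i ≠ "" ∧ i ≠ "NC" := by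
        unfold pvValid at hB; rwa [decide_eq_true_eq] at hB
      have hne : ¬ (i = "" ∧ r = "") := fun h => hv.2.1 h.1
      rw [if_neg hne, if_pos hv]
      rw [foldl_stepA_min l i hv.2.1 hv.2.2 hv.1]
      obtain ⟨rfl, rfl⟩ : i = v ∧ l.filter pvValid = t := by
        constructor <;> [exact (List.cons.injEq .. ▸ hf).1; exact (List.cons.injEq .. ▸ hf).2]
      rfl
    · rw [if_neg hB] at hf
      have hv : ¬ (i < "2999-01-01" ∧ i ≠ "" ∧ i ≠ "NC") := by
        intro h; exact hB (by unfold pvValid; rw [decide_eq_true_eq]; exact h)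
      rw [if_neg hv]
      by_cases hi : i = "" ∧ r = ""
      · rw [if_pos hi]; exact ih "NC" (Or.inr rfl) hf
      · rw [if_neg hi]; exact ih r hr hf

-- ===== VERDICT (by name: the statement is the Claim_ definition above) =====
theorem filterDivorceDates_spec : Claim_equal_filterDivorceDates := by
  intro x _
  unfold Spec_filterDivorceDates filterDivorceDates filterDivorceDates_alt
  simp only []
  cases hf : x.2.2.filter pvValid with
  | nil =>
    rw [foldl_stepA_empty x.2.2 "" (Or.inl rfl) hf]
    simp
  | cons v t =>
    rw [foldl_stepA_cons x.2.2 "" v t (Or.inl rfl) hf]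
    simp [PySem.List.min?_id_cons]
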